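-- pv_equiv track=rewrite | github.com/aaronjazhiel/poc-code-analyzer | bedrock-tobe-lambda.py | detect_risks
-- ===== SOURCE A (Python) =====
-- def detect_risks(all_files, pom_content, app_props, languages):
--     risks = []
--
--     # Java version
--     if pom_content:
--         if "1.8" in pom_content or "java.version>1.8" in pom_content or "<java.version>8" in pom_content:
--             risks.append("Java 1.8 EOL — migración urgente a Java 21 LTS")
--         elif "java.version>11" in pom_content or "<java.version>11" in pom_content:
--             risks.append("Java 11 — considerar migración a Java 21 LTS")
--         if "2.7." in pom_content or "2.6." in pom_content:
--             risks.append("Spring Boot 2.x EOL — migrar a Spring Boot 3.x")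
--
--     # Tests
--     test_files = [f for f in all_files if "test" in f.lower() and f.endswith(".java")]
--     if len(test_files) == 0:
--         risks.append("Sin tests unitarios detectados — riesgo alto de regresión")
--     elif len(test_files) < 5:
--         risks.append(f"Cobertura de tests baja — solo {len(test_files)} archivos de test")
--
--     # Docker
--     docker_files = [f for f in all_files if "dockerfile" in f.lower() or "docker-compose" in f.lower()]
--     if not docker_files:
--         risks.append("Sin Dockerfile ni docker-compose — no containerizado")
--
--     # CI/CD
--     cicd_files = [f for f in all_files if ".github/workflows" in f or "jenkins" in f.lower() or "gitlab-ci" in f.lower()]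
--     if not cicd_files:
--         risks.append("Sin pipeline CI/CD detectado")
--
--     # DB2
--     if pom_content and "db2" in pom_content.lower():
--         risks.append("DB2 — base de datos legacy, considerar migración a PostgreSQL")
--
--     return risks
-- ===== SOURCE B (Python) =====
-- def detect_risks(all_files, pom_content, app_props, languages):
--     # one pass over all_files maintaining a counter and two flags instead of building three filtered lists
--     test_count = 0
--     has_docker = False
--     has_cicd = False
--     for f in all_files:
--         fl = f.lower()
--         if "test" in fl and f.endswith(".java"):
--             test_count += 1
--         if "dockerfile" in fl or "docker-compose" in fl:
--             has_docker = True
--         if ".github/workflows" in f or "jenkins" in fl or "gitlab-ci" in fl: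
--             has_cicd = True
--
--     risks = []
--     if pom_content:
--         if "1.8" in pom_content or "java.version>1.8" in pom_content or "<java.version>8" in pom_content:
--             risks.append("Java 1.8 EOL — migración urgente a Java 21 LTS")
--         elif "java.version>11" in pom_content or "<java.version>11" in pom_content:
--             risks.append("Java 11 — considerar migración a Java 21 LTS")
--         if "2.7." in pom_content or "2.6." in pom_content:
--             risks.append("Spring Boot 2.x EOL — migrar a Spring Boot 3.x")
--
--     if test_count == 0:
--         risks.append("Sin tests unitarios detectados — riesgo alto de regresión")
--     elif test_count < 5:
--         risks.append(f"Cobertura de tests baja — solo {test_count} archivos de test")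
--
--     if not has_docker:
--         risks.append("Sin Dockerfile ni docker-compose — no containerizado")
--
--     if not has_cicd:
--         risks.append("Sin pipeline CI/CD detectado")
--
--     if pom_content and "db2" in pom_content.lower():
--         risks.append("DB2 — base de datos legacy, considerar migración a PostgreSQL")
--
--     return risks
-- ===== Notes on version B (the rewrite author's own statement) =====
-- stated objective: faster
-- what changed: Replaces the three independent list-comprehension scans over all_files (each building a list) with a single pass maintaining a test counter and docker/CI-CD flags, lowercasing each file name once.
import Mathlib
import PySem

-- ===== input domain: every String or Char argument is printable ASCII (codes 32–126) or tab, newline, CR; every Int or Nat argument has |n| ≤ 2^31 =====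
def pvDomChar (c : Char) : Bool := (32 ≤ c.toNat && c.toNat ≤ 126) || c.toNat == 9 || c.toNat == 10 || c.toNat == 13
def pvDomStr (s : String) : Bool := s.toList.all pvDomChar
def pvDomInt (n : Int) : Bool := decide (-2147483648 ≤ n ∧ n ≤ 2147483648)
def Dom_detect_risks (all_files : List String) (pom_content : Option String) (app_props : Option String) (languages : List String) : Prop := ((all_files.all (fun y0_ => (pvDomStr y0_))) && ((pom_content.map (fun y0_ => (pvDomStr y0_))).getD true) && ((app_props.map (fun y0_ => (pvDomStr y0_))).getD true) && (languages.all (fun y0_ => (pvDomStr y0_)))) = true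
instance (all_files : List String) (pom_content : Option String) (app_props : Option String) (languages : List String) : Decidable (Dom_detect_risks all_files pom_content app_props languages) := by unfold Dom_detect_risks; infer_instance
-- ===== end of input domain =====

-- B replaces A's three independent filtering scans of all_files with one pass keeping a counter and two flags (objective: faster, constant-factor).

-- ===== PORT A =====
-- predicates of A's three list comprehensions
def pvIsTest (f : String) : Bool :=
  PySem.Str.isIn "test" (PySem.Str.lower f) && PySem.Str.endswith f ".java"
def pvIsDocker (f : String) : Bool :=
  PySem.Str.isIn "dockerfile" (PySem.Str.lower f) || PySem.Str.isIn "docker-compose" (PySem.Str.lower f)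
def pvIsCicd (f : String) : Bool :=
  PySem.Str.isIn ".github/workflows" f || PySem.Str.isIn "jenkins" (PySem.Str.lower f) || PySem.Str.isIn "gitlab-ci" (PySem.Str.lower f)

def pvPomRisks (pom_content : Option String) (risks : List String) : List String :=
  match pom_content with
  | some p =>
    if p ≠ "" then
      let risks :=
        if PySem.Str.isIn "1.8" p || PySem.Str.isIn "java.version>1.8" p || PySem.Str.isIn "<java.version>8" p then
          risks ++ ["Java 1.8 EOL — migración urgente a Java 21 LTS"]
        else if PySem.Str.isIn "java.version>11" p || PySem.Str.isIn "<java.version>11" p then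
          risks ++ ["Java 11 — considerar migración a Java 21 LTS"]
        else risks
      if PySem.Str.isIn "2.7." p || PySem.Str.isIn "2.6." p then
        risks ++ ["Spring Boot 2.x EOL — migrar a Spring Boot 3.x"]
      else risks
    else risks
  | none => risks

def pvDb2Risk (pom_content : Option String) (risks : List String) : List String :=
  match pom_content with
  | some p =>
    if p ≠ "" && PySem.Str.isIn "db2" (PySem.Str.lower p) then
      risks ++ ["DB2 — base de datos legacy, considerar migración a PostgreSQL"]
    else risks
  | none => risks

def detect_risks (all_files : List String) (pom_content : Option String) (app_props : Option String) (languages : List String) : List String :=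
  let risks : List String := []
  let risks := pvPomRisks pom_content risks
  let test_files := all_files.filter pvIsTest
  let risks :=
    if test_files.length = 0 then
      risks ++ ["Sin tests unitarios detectados — riesgo alto de regresión"]
    else if test_files.length < 5 then
      risks ++ ["Cobertura de tests baja — solo " ++ PySem.Int.toStr (test_files.length : Int) ++ " archivos de test"]
    else risks
  let docker_files := all_files.filter pvIsDocker
  let risks := if docker_files.isEmpty then risks ++ ["Sin Dockerfile ni docker-compose — no containerizado"] else risks
  let cicd_files := all_files.filter pvIsCicd
  let risks := if cicd_files.isEmpty then risks ++ ["Sin pipeline CI/CD detectado"] else risks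
  pvDb2Risk pom_content risks

-- ===== PORT B =====
-- the single B loop: (test_count, has_docker, has_cicd)
def pvScan (all_files : List String) (st : Nat × Bool × Bool) : Nat × Bool × Bool :=
  all_files.foldl
    (fun st f =>
      let fl := PySem.Str.lower f
      let tc := if PySem.Str.isIn "test" fl && PySem.Str.endswith f ".java" then st.1 + 1 else st.1
      let hd := if PySem.Str.isIn "dockerfile" fl || PySem.Str.isIn "docker-compose" fl then true else st.2.1
      let hc := if PySem.Str.isIn ".github/workflows" f || PySem.Str.isIn "jenkins" fl || PySem.Str.isIn "gitlab-ci" fl then true else st.2.2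
      (tc, hd, hc)) st

def detect_risks_alt (all_files : List String) (pom_content : Option String) (app_props : Option String) (languages : List String) : List String :=
  let st := pvScan all_files (0, false, false)
  let test_count := st.1
  let has_docker := st.2.1
  let has_cicd := st.2.2
  let risks : List String := []
  let risks := pvPomRisks pom_content risks
  let risks :=
    if test_count = 0 then
      risks ++ ["Sin tests unitarios detectados — riesgo alto de regresión"]
    else if test_count < 5 then
      risks ++ ["Cobertura de tests baja — solo " ++ PySem.Int.toStr (test_count : Int) ++ " archivos de test"]
    else risks
  let risks := if !has_docker then risks ++ ["Sin Dockerfile ni docker-compose — no containerizado"] else risks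
  let risks := if !has_cicd then risks ++ ["Sin pipeline CI/CD detectado"] else risks
  pvDb2Risk pom_content risks

-- ===== PRECONDITION & SPEC =====
def Spec_detect_risks (all_files : List String) (pom_content : Option String) (app_props : Option String) (languages : List String) (out : List String) : Prop := out = detect_risks_alt all_files pom_content app_props languages
instance (all_files : List String) (pom_content : Option String) (app_props : Option String) (languages : List String) (out : List String) : Decidable (Spec_detect_risks all_files pom_content app_props languages out) := by unfold Spec_detect_risks; infer_instance

-- ===== CLAIM (what is proved, stated in full; the proofs are below) =====
def Claim_equal_detect_risks : Prop := ∀ (all_files : List String) (pom_content : Option String) (app_props : Option String) (languages : List String), Dom_detect_risks all_files pom_content app_props languages → Spec_detect_risks all_files pom_content app_props languages (detect_risks all_files pom_content app_props languages)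

-- ===== LEMMAS AND PROOFS =====
-- the fold's invariant: the one-pass state is the filter length / any of the three predicates
theorem pvScan_eq (all_files : List String) (st : Nat × Bool × Bool) :
    pvScan all_files st =
      (st.1 + (all_files.filter pvIsTest).length,
       st.2.1 || all_files.any pvIsDocker,
       st.2.2 || all_files.any pvIsCicd) := by
  induction all_files generalizing st with
  | nil => simp [pvScan]
  | cons f fs ih =>
    obtain ⟨tc, hd, hc⟩ := st
    simp only [pvScan, List.foldl_cons] at *
    rw [ih]
    simp only [List.filter_cons, List.any_cons, pvIsTest, pvIsDocker, pvIsCicd]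
    split_ifs <;> simp_all <;> omega

-- ===== VERDICT (by name: the statement is the Claim_ definition above) =====
theorem detect_risks_spec : Claim_equal_detect_risks := by
  intro all_files pom_content app_props languages _
  unfold Spec_detect_risks detect_risks detect_risks_alt
  rw [pvScan_eq]
  simp [List.isEmpty_iff, List.filter_eq_nil_iff, List.any_eq_true]
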